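-- pv_equiv track=rewrite | github.com/soyjubilado/AdventOfCode | 2021/17/prog202117.py | StepsInTarget_X
-- ===== SOURCE A (Python) =====
-- def StepsInTarget_X(vx, target_x, max_steps=250):
--   """returns a list of what steps during which torpedo is in target area."""
--   x_min, x_max = target_x
--   x = 0
--   in_target = []
--   step = 0
--   while x < x_max and step < max_steps:
--     step += 1
--     x += vx
--     vx = vx - 1 if vx > 0 else 0
--     if x >= x_min and x <= x_max:
--       in_target.append(step)
--   return in_target
-- ===== SOURCE B (Python) =====
-- def StepsInTarget_X(vx, target_x, max_steps=250):
--   """Closed form: x(t) is non-decreasing, so the in-target steps are one contiguous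
--   range; find its endpoints by binary search on the closed-form position instead of
--   simulating step by step."""
--   x_min, x_max = target_x
--   if max_steps <= 0 or x_max <= 0:
--     return []
--   if vx <= 0:
--     # x jumps to vx on step 1 and stays there forever
--     return list(range(1, max_steps + 1)) if vx >= x_min else []
--   n = 2 * vx + 1
--   peak = vx * (vx + 1) // 2
--
--   def xat(t):           # position after step t, for 1 <= t <= vx
--     return t * (n - t) // 2
--
--   def first_ge(c):      # least step t >= 1 with x(t) >= c, or None if never
--     if c > peak:
--       return None
--     lo, hi = 1, vx
--     while lo < hi:
--       mid = (lo + hi) // 2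
--       if xat(mid) >= c:
--         hi = mid
--       else:
--         lo = mid + 1
--     return lo
--
--   first = first_ge(x_min)
--   if first is None:
--     return []
--   stop = first_ge(x_max)        # the simulation halts once x >= x_max
--   steps = max_steps if stop is None else min(max_steps, stop)
--   over = first_ge(x_max + 1)    # first step strictly past the target
--   last = steps if over is None else min(steps, over - 1)
--   return list(range(first, last + 1))
-- ===== Notes on version B (the rewrite author's own statement) =====
-- stated objective: alternative
-- what changed: Replaces A's step-by-step simulation of the torpedo with a closed-form position function and binary search for the first/last in-target step, returning the contiguous range directly instead of appending inside a loop.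
import Mathlib
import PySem

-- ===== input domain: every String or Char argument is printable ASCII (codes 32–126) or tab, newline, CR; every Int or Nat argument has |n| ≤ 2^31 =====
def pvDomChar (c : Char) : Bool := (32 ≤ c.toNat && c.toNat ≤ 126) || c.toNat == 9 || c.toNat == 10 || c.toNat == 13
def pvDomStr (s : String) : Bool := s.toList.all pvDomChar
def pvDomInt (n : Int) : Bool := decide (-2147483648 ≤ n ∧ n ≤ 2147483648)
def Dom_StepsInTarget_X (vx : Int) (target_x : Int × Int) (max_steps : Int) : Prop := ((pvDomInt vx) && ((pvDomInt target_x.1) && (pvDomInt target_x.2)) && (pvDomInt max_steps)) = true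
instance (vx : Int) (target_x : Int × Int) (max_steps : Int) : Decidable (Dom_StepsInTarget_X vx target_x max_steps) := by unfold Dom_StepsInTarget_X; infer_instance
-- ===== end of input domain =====

-- B replaces A's step-by-step simulation by closed-form/binary-search computation of the
-- single contiguous range of in-target steps (objective: alternative algorithm).

-- ===== PORT A =====
-- the while loop of A, fuel = max_steps - step
def stepsLoopA (xmin xmax : Int) : Int → Int → Int → List Int → Nat → List Int
  | _, _, _, acc, 0 => acc
  | vx, x, step, acc, fuel+1 =>
    if x < xmax then
      stepsLoopA xmin xmax (if vx > 0 then vx - 1 else 0) (x + vx) (step + 1)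
        (if xmin ≤ x + vx ∧ x + vx ≤ xmax then acc ++ [step + 1] else acc) fuel
    else acc

def StepsInTarget_X (vx : Int) (target_x : Int × Int) (max_steps : Int) : List Int :=
  stepsLoopA target_x.1 target_x.2 vx 0 0 [] max_steps.toNat

-- ===== PORT B =====
-- closed-form position after step t (1 ≤ t ≤ vx), n = 2*vx+1
def xatB (n t : Int) : Int := PySem.Int.floordiv (t * (n - t)) 2

-- the while loop of B's binary search, fuel = hi - lo
def bsLoop (n c : Int) : Int → Int → Nat → Int
  | lo, _, 0 => lo
  | lo, hi, fuel+1 =>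
    if lo < hi then
      if xatB n (PySem.Int.floordiv (lo + hi) 2) ≥ c then
        bsLoop n c lo (PySem.Int.floordiv (lo + hi) 2) fuel
      else
        bsLoop n c (PySem.Int.floordiv (lo + hi) 2 + 1) hi fuel
    else lo

-- least step t ≥ 1 with x(t) ≥ c, none if the peak never reaches c
def firstGeB (vx n peak c : Int) : Option Int :=
  if c > peak then none else some (bsLoop n c 1 vx (vx - 1).toNat)

def StepsInTarget_X_alt (vx : Int) (target_x : Int × Int) (max_steps : Int) : List Int :=
  let x_min := target_x.1
  let x_max := target_x.2
  if max_steps ≤ 0 ∨ x_max ≤ 0 then []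
  else if vx ≤ 0 then
    if vx ≥ x_min then PySem.List.pyRange 1 (max_steps + 1) 1 else []
  else
    let n := 2 * vx + 1
    let peak := PySem.Int.floordiv (vx * (vx + 1)) 2
    match firstGeB vx n peak x_min with
    | none => []
    | some first =>
      let steps := match firstGeB vx n peak x_max with
        | none => max_steps
        | some stop => min max_steps stop
      let last := match firstGeB vx n peak (x_max + 1) with
        | none => steps
        | some ov => min steps (ov - 1)
      PySem.List.pyRange first (last + 1) 1

-- ===== PRECONDITION & SPEC =====
def Spec_StepsInTarget_X (vx : Int) (target_x : Int × Int) (max_steps : Int) (out : List Int) : Prop := out = StepsInTarget_X_alt vx target_x max_steps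
instance (vx : Int) (target_x : Int × Int) (max_steps : Int) (out : List Int) : Decidable (Spec_StepsInTarget_X vx target_x max_steps out) := by unfold Spec_StepsInTarget_X; infer_instance

-- ===== CLAIM (what is proved, stated in full; the proofs are below) =====
def Claim_equal_StepsInTarget_X : Prop := ∀ (vx : Int) (target_x : Int × Int) (max_steps : Int), Dom_StepsInTarget_X vx target_x max_steps → Spec_StepsInTarget_X vx target_x max_steps (StepsInTarget_X vx target_x max_steps)

-- ===== LEMMAS AND PROOFS =====

-- the velocity after t steps of A's loop
def vxAt (v : Int) : Nat → Int
  | 0 => v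
  | t+1 => if vxAt v t > 0 then vxAt v t - 1 else 0

-- the position after t steps of A's loop
def posAt (v : Int) : Nat → Int
  | 0 => 0
  | t+1 => posAt v t + vxAt v t

lemma vxAt_closed (v : Int) (hv : 0 ≤ v) : ∀ t : Nat, vxAt v t = max (v - t) 0 := by
  intro t
  induction t with
  | zero => simp [vxAt]; omega
  | succ t ih => simp only [vxAt, ih]; push_cast; split_ifs <;> omega

lemma vxAt_zero_of_nonpos (v : Int) (hv : v ≤ 0) : ∀ t : Nat, 1 ≤ t → vxAt v t = 0 := by
  intro t
  induction t with
  | zero => omega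
  | succ t ih =>
    intro _
    rcases Nat.eq_zero_or_pos t with h0 | h1
    · subst h0; simp [vxAt]; omega
    · simp only [vxAt, ih h1]; norm_num

lemma posAt_const_of_nonpos (v : Int) (hv : v ≤ 0) : ∀ t : Nat, 1 ≤ t → posAt v t = v := by
  intro t
  induction t with
  | zero => omega
  | succ t ih =>
    intro _
    rcases Nat.eq_zero_or_pos t with h0 | h1
    · subst h0; simp [posAt, vxAt]
    · simp only [posAt, ih h1, vxAt_zero_of_nonpos v hv t h1]; ring

lemma posAt_closed (v : Int) (hv : 1 ≤ v) :
    ∀ t : Nat, 2 * posAt v t = (min (t:Int) v) * (2*v + 1 - min (t:Int) v) := by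
  intro t
  induction t with
  | zero => simp [posAt]; omega
  | succ t ih =>
    have hvx := vxAt_closed v (by omega) t
    simp only [posAt, mul_add, ih, hvx]
    push_cast
    rcases (show v ≤ (t:Int) ∨ (t:Int) < v by omega) with h | h
    · rw [min_eq_right h, min_eq_right (by omega : v ≤ (t:Int) + 1)]; omega
    · rw [min_eq_left (by omega : (t:Int) ≤ v), min_eq_left (by omega : (t:Int) + 1 ≤ v),
        max_eq_left (by omega : (0:Int) ≤ v - t)]
      ring

lemma posAt_mono (v : Int) (hv : 0 ≤ v) : ∀ s t : Nat, s ≤ t → posAt v s ≤ posAt v t := by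
  intro s t hst
  induction t with
  | zero => interval_cases s; rfl
  | succ t ih =>
    rcases Nat.lt_or_ge s (t+1) with h | h
    · have := ih (by omega)
      have hvx := vxAt_closed v hv t
      simp only [posAt]
      have : 0 ≤ vxAt v t := by rw [hvx]; omega
      omega
    · have : s = t + 1 := by omega
      subst this; rfl

lemma posAt_le_peak (v : Int) (hv : 1 ≤ v) : ∀ t : Nat, posAt v t ≤ posAt v v.toNat := by
  intro t
  rcases (show t ≤ v.toNat ∨ v.toNat < t by omega) with h | h
  · exact posAt_mono v (by omega) t v.toNat h
  · have h1 := posAt_closed v hv t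
    have h2 := posAt_closed v hv v.toNat
    have hc : ((v.toNat : Nat) : Int) = v := by omega
    rw [hc, min_self] at h2
    have ht : min ((t:Nat):Int) v = v := by
      rw [min_eq_right]; omega
    rw [ht] at h1
    omega

lemma xatB_eq_posAt (v : Int) (hv : 1 ≤ v) (t : Int) (h1 : 1 ≤ t) (h2 : t ≤ v) :
    xatB (2*v+1) t = posAt v t.toNat := by
  have hp := posAt_closed v hv t.toNat
  have hc : ((t.toNat : Nat) : Int) = t := by omega
  rw [hc, min_eq_left h2] at hp
  have hev : (t * (2*v+1 - t)) % 2 = 0 := by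
    rcases Int.even_or_odd t with ⟨k, hk⟩ | ⟨k, hk⟩
    · subst hk; ring_nf; omega
    · subst hk
      have : (2*k+1) * (2*v+1 - (2*k+1)) = 2 * ((2*k+1) * (v - k)) := by ring
      rw [this]; omega
  unfold xatB
  rw [PySem.Int.floordiv_eq_ediv_of_pos (by norm_num)]
  omega

lemma peak_eq (v : Int) (hv : 1 ≤ v) :
    PySem.Int.floordiv (v*(v+1)) 2 = posAt v v.toNat := by
  have h := xatB_eq_posAt v hv v hv le_rfl
  rw [← h]
  unfold xatB
  have : v * (2*v+1 - v) = v * (v + 1) := by ring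
  rw [this]

lemma bsLoop_spec (v c : Int) (hv : 1 ≤ v) :
    ∀ (fuel : Nat) (lo hi : Int), 1 ≤ lo → lo ≤ hi → hi ≤ v → hi - lo ≤ (fuel:Int) →
    c ≤ posAt v hi.toNat → (∀ t : Int, 1 ≤ t → t < lo → posAt v t.toNat < c) →
    (1 ≤ bsLoop (2*v+1) c lo hi fuel ∧ bsLoop (2*v+1) c lo hi fuel ≤ v ∧
     c ≤ posAt v (bsLoop (2*v+1) c lo hi fuel).toNat ∧
     ∀ t : Int, 1 ≤ t → t < bsLoop (2*v+1) c lo hi fuel → posAt v t.toNat < c) := by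
  intro fuel
  induction fuel with
  | zero =>
    intro lo hi h1 h2 h3 h4 h5 h6
    have : hi = lo := by omega
    subst this
    simp only [bsLoop]
    exact ⟨h1, h3, h5, h6⟩
  | succ fuel ih =>
    intro lo hi h1 h2 h3 h4 h5 h6
    simp only [bsLoop]
    by_cases hlt : lo < hi
    · rw [if_pos hlt]
      have hmid := PySem.Int.floordiv_two_mid_bounds (le_of_lt hlt)
      set mid := PySem.Int.floordiv (lo + hi) 2 with hmdef
      have hmlt : mid < hi := by
        rw [hmdef, PySem.Int.floordiv_eq_ediv_of_pos (by norm_num)]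
        omega
      have hm1 : 1 ≤ mid := by omega
      have hmv : mid ≤ v := by omega
      have hxm := xatB_eq_posAt v hv mid hm1 hmv
      by_cases hc : xatB (2*v+1) mid ≥ c
      · rw [if_pos hc]
        exact ih lo mid h1 hmid.1 (by omega) (by omega) (by rw [← hxm]; exact hc) h6
      · rw [if_neg hc]
        refine ih (mid+1) hi (by omega) (by omega) h3 (by omega) h5 ?_
        intro t ht1 ht2
        rcases (show t < lo ∨ lo ≤ t by omega) with h | h
        · exact h6 t ht1 h
        · have hmono : posAt v t.toNat ≤ posAt v mid.toNat :=
            posAt_mono v (by omega) t.toNat mid.toNat (by omega)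
          rw [← hxm] at hmono
          omega
    · rw [if_neg hlt]
      have : hi = lo := by omega
      subst this
      exact ⟨h1, h3, h5, h6⟩

lemma stepsLoopA_mem (xmin xmax v ms u : Int) :
    ∀ (fuel : Nat) (t : Nat) (acc : List Int), fuel = (ms - t).toNat →
    (u ∈ stepsLoopA xmin xmax (vxAt v t) (posAt v t) t acc fuel ↔
      u ∈ acc ∨ ((t:Int) < u ∧ u ≤ ms ∧ (∀ s : Nat, t ≤ s → (s:Int) < u → posAt v s < xmax) ∧
                 xmin ≤ posAt v u.toNat ∧ posAt v u.toNat ≤ xmax)) := by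
  intro fuel
  induction fuel with
  | zero =>
    intro t acc h
    simp only [stepsLoopA]
    constructor
    · exact Or.inl
    · rintro (hm | ⟨h1, h2, _, _⟩)
      · exact hm
      · omega
  | succ fuel ih =>
    intro t acc h
    simp only [stepsLoopA]
    by_cases hx : posAt v t < xmax
    · rw [if_pos hx]
      have e1 : (if vxAt v t > 0 then vxAt v t - 1 else 0) = vxAt v (t+1) := rfl
      have e2 : posAt v t + vxAt v t = posAt v (t+1) := rfl
      have e3 : ((t:Int) + 1) = (((t+1 : Nat)) : Int) := by push_cast; ring
      rw [e1, e2, e3, ih (t+1) _ (by omega)]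
      constructor
      · rintro (hacc' | ⟨h1, h2, h3, h4, h5⟩)
        · split_ifs at hacc' with hP
          · rcases List.mem_append.1 hacc' with hm | hm
            · exact Or.inl hm
            · have hu : u = (t:Int) + 1 := by simpa using hm
              have hut : u.toNat = t + 1 := by omega
              refine Or.inr ⟨by omega, by omega, ?_, ?_, ?_⟩
              · intro s hs1 hs2
                have : s = t := by omega
                subst this; exact hx
              · rw [hut]; exact hP.1
              · rw [hut]; exact hP.2
          · exact Or.inl hacc'
        · refine Or.inr ⟨by push_cast at h1 ⊢; omega, h2, ?_, h4, h5⟩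
          intro s hs1 hs2
          rcases (show s = t ∨ t + 1 ≤ s by omega) with hst | hst
          · subst hst; exact hx
          · exact h3 s hst hs2
      · rintro (hacc | ⟨h1, h2, h3, h4, h5⟩)
        · refine Or.inl ?_
          split_ifs with hP
          · exact List.mem_append.2 (Or.inl hacc)
          · exact hacc
        · by_cases hu : u = (t:Int) + 1
          · refine Or.inl ?_
            have hut : u.toNat = t + 1 := by omega
            rw [hut] at h4 h5
            rw [if_pos ⟨h4, h5⟩]
            exact List.mem_append.2 (Or.inr (by simp [hu]))
          · refine Or.inr ⟨by push_cast; omega, h2, ?_, h4, h5⟩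
            intro s hs1 hs2
            exact h3 s (by omega) hs2
    · rw [if_neg hx]
      constructor
      · exact Or.inl
      · rintro (hm | ⟨h1, h2, h3, _, _⟩)
        · exact hm
        · exact absurd (h3 t le_rfl h1) (by omega)

lemma stepsLoopA_sorted (xmin xmax : Int) :
    ∀ (fuel : Nat) (vx x step : Int) (acc : List Int),
    acc.Pairwise (· < ·) → (∀ a ∈ acc, a ≤ step) →
    (stepsLoopA xmin xmax vx x step acc fuel).Pairwise (· < ·) := by
  intro fuel
  induction fuel with
  | zero => intro vx x step acc h1 _; simpa [stepsLoopA] using h1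
  | succ fuel ih =>
    intro vx x step acc h1 h2
    simp only [stepsLoopA]
    by_cases hx : x < xmax
    · rw [if_pos hx]
      by_cases hP : xmin ≤ x + vx ∧ x + vx ≤ xmax
      · rw [if_pos hP]
        refine ih _ _ _ _ ?_ ?_
        · refine List.pairwise_append.2 ⟨h1, by simp, ?_⟩
          intro a ha b hb
          have := h2 a ha
          simp at hb
          omega
        · intro a ha
          rcases List.mem_append.1 ha with hm | hm
          · have := h2 a hm; omega
          · simp at hm; omega
      · rw [if_neg hP]
        refine ih _ _ _ _ h1 ?_
        intro a ha
        have := h2 a ha; omega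
    · rw [if_neg hx]; exact h1

lemma eq_of_pairwise_lt_of_mem {l₁ l₂ : List Int}
    (h1 : l₁.Pairwise (· < ·)) (h2 : l₂.Pairwise (· < ·))
    (h : ∀ a : Int, a ∈ l₁ ↔ a ∈ l₂) : l₁ = l₂ := by
  have n1 : l₁.Nodup := h1.imp ne_of_lt
  have n2 : l₂.Nodup := h2.imp ne_of_lt
  have hp : l₁.Perm l₂ := (List.perm_ext_iff_of_nodup n1 n2).2 h
  exact hp.eq_of_pairwise (fun a b _ _ h1 h2 => le_antisymm h1 h2) (h1.imp le_of_lt) (h2.imp le_of_lt)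

lemma A_mem (v xmin xmax ms u : Int) :
    u ∈ StepsInTarget_X v (xmin, xmax) ms ↔
      (0 < u ∧ u ≤ ms ∧ (∀ s : Nat, (s:Int) < u → posAt v s < xmax) ∧
       xmin ≤ posAt v u.toNat ∧ posAt v u.toNat ≤ xmax) := by
  have h := stepsLoopA_mem xmin xmax v ms u ms.toNat 0 [] (by omega)
  simp only [vxAt, posAt, Nat.cast_zero, List.not_mem_nil, false_or] at h
  unfold StepsInTarget_X
  rw [show ((xmin, xmax) : Int × Int).1 = xmin from rfl,
      show ((xmin, xmax) : Int × Int).2 = xmax from rfl, h]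
  constructor
  · rintro ⟨h1, h2, h3, h4, h5⟩
    exact ⟨h1, h2, fun s hs => h3 s (Nat.zero_le s) hs, h4, h5⟩
  · rintro ⟨h1, h2, h3, h4, h5⟩
    exact ⟨h1, h2, fun s _ hs => h3 s hs, h4, h5⟩

lemma A_sorted (v xmin xmax ms : Int) :
    (StepsInTarget_X v (xmin, xmax) ms).Pairwise (· < ·) := by
  exact stepsLoopA_sorted xmin xmax ms.toNat v 0 0 [] (by simp) (by simp)

lemma rangeIff (v xmin xmax ms first lastv u : Int) (hv : 1 ≤ v) (hxmax : 1 ≤ xmax)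
    (f1 : 1 ≤ first)
    (f3 : xmin ≤ posAt v first.toNat)
    (f4 : ∀ t : Int, 1 ≤ t → t < first → posAt v t.toNat < xmin)
    (l1 : lastv ≤ ms)
    (l2 : ∀ s : Int, 1 ≤ s → s < lastv → posAt v s.toNat < xmax)
    (l3 : posAt v lastv.toNat ≤ xmax ∨ lastv < first)
    (l4 : ∀ w : Int, 0 < w → w ≤ ms → (∀ s : Nat, (s:Int) < w → posAt v s < xmax) →
          posAt v w.toNat ≤ xmax → w ≤ lastv) :
    (first ≤ u ∧ u ≤ lastv) ↔
      (0 < u ∧ u ≤ ms ∧ (∀ s : Nat, (s:Int) < u → posAt v s < xmax) ∧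
       xmin ≤ posAt v u.toNat ∧ posAt v u.toNat ≤ xmax) := by
  constructor
  · rintro ⟨h1, h2⟩
    have hl3 : posAt v lastv.toNat ≤ xmax := by
      rcases l3 with h | h
      · exact h
      · omega
    refine ⟨by omega, by omega, ?_, ?_, ?_⟩
    · intro s hs
      rcases Nat.eq_zero_or_pos s with h0 | hpos
      · subst h0; simp [posAt]; omega
      · exact l2 s (by omega) (by omega)
    · calc xmin ≤ posAt v first.toNat := f3
        _ ≤ posAt v u.toNat := posAt_mono v (by omega) _ _ (by omega)
    · calc posAt v u.toNat ≤ posAt v lastv.toNat := posAt_mono v (by omega) _ _ (by omega)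
        _ ≤ xmax := hl3
  · rintro ⟨h1, h2, h3, h4, h5⟩
    constructor
    · by_contra hfu
      exact absurd h4 (by have := f4 u (by omega) (by omega); omega)
    · exact l4 u h1 h2 h3 h5

lemma posAt_le_pk (v : Int) (hv : 1 ≤ v) (s : Nat) :
    posAt v s ≤ PySem.Int.floordiv (v*(v+1)) 2 := by
  rw [peak_eq v hv]; exact posAt_le_peak v hv s

lemma alt_mem (v xmin xmax ms u : Int) (hv : 1 ≤ v) (hms : 1 ≤ ms) (hxmax : 1 ≤ xmax) :
    u ∈ StepsInTarget_X_alt v (xmin, xmax) ms ↔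
      (0 < u ∧ u ≤ ms ∧ (∀ s : Nat, (s:Int) < u → posAt v s < xmax) ∧
       xmin ≤ posAt v u.toNat ∧ posAt v u.toNat ≤ xmax) := by
  have hpk := peak_eq v hv
  have hle := posAt_le_pk v hv
  simp only [StepsInTarget_X_alt, firstGeB]
  rw [if_neg (show ¬(ms ≤ 0 ∨ xmax ≤ 0) by omega),
      if_neg (show ¬ v ≤ 0 by omega)]
  by_cases hmin : xmin > PySem.Int.floordiv (v*(v+1)) 2
  · rw [if_pos hmin]
    simp only [List.not_mem_nil, false_iff]
    rintro ⟨_, _, _, h4, _⟩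
    exact absurd h4 (by have := hle u.toNat; omega)
  · rw [if_neg hmin]
    simp only []
    obtain ⟨f1, f2, f3, f4⟩ := bsLoop_spec v xmin hv (v-1).toNat 1 v (by omega) hv le_rfl
      (by omega) (by rw [← hpk]; omega) (by intro t h1 h2; omega)
    set first := bsLoop (2*v+1) xmin 1 v (v-1).toNat with hfdef
    by_cases hs : xmax > PySem.Int.floordiv (v*(v+1)) 2
    · rw [if_pos hs, if_pos (show xmax + 1 > PySem.Int.floordiv (v*(v+1)) 2 by omega)]
      simp only []
      rw [PySem.List.mem_pyRange_one]
      have core := rangeIff v xmin xmax ms first ms u hv hxmax f1 f3 f4 le_rfl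
        (fun s h1 h2 => by have := hle s.toNat; omega)
        (Or.inl (by have := hle ms.toNat; omega))
        (fun w h1 h2 _ _ => h2)
      rw [← core]
      omega
    · rw [if_neg hs]
      simp only []
      obtain ⟨s1, s2, s3, s4⟩ := bsLoop_spec v xmax hv (v-1).toNat 1 v (by omega) hv le_rfl
        (by omega) (by rw [← hpk]; omega) (by intro t h1 h2; omega)
      set st := bsLoop (2*v+1) xmax 1 v (v-1).toNat with hstdef
      have hult : ∀ w : Int, 0 < w → (∀ s : Nat, (s:Int) < w → posAt v s < xmax) → w ≤ st := by
        intro w h1 h2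
        by_contra hw
        have := h2 st.toNat (by omega)
        omega
      by_cases ho : xmax + 1 > PySem.Int.floordiv (v*(v+1)) 2
      · rw [if_pos ho]
        simp only []
        rw [PySem.List.mem_pyRange_one]
        have core := rangeIff v xmin xmax ms first (min ms st) u hv hxmax f1 f3 f4
          (min_le_left _ _)
          (fun s h1 h2 => s4 s h1 (by omega))
          (Or.inl (by have := hle (min ms st).toNat; omega))
          (fun w h1 h2 h3 _ => le_min h2 (hult w h1 h3))
        rw [← core]
        exact ⟨fun ⟨a, b⟩ => ⟨a, Int.lt_add_one_iff.mp b⟩,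
               fun ⟨a, b⟩ => ⟨a, Int.lt_add_one_iff.mpr b⟩⟩
      · rw [if_neg ho]
        simp only []
        obtain ⟨o1, o2, o3, o4⟩ := bsLoop_spec v (xmax+1) hv (v-1).toNat 1 v (by omega) hv
          le_rfl (by omega) (by rw [← hpk]; omega) (by intro t h1 h2; omega)
        set ov := bsLoop (2*v+1) (xmax+1) 1 v (v-1).toNat with hovdef
        rw [PySem.List.mem_pyRange_one]
        have l3 : posAt v (min (min ms st) (ov-1)).toNat ≤ xmax ∨ min (min ms st) (ov-1) < first := by
          rcases (show min (min ms st) (ov-1) < 1 ∨ 1 ≤ min (min ms st) (ov-1) by omega) with h | h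
          · exact Or.inr (by omega)
          · exact Or.inl (by have := o4 (min (min ms st) (ov-1)) h (by omega); omega)
        have core := rangeIff v xmin xmax ms first (min (min ms st) (ov-1)) u hv hxmax f1 f3 f4
          (by omega)
          (fun s h1 h2 => s4 s h1 (by omega))
          l3
          ?_
        · rw [← core]
          exact ⟨fun ⟨a, b⟩ => ⟨a, Int.lt_add_one_iff.mp b⟩,
                 fun ⟨a, b⟩ => ⟨a, Int.lt_add_one_iff.mpr b⟩⟩
        · intro w h1 h2 h3 h4
          have hwst : w ≤ st := hult w h1 h3
          have hwov : w ≤ ov - 1 := by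
            by_contra hw
            have hmono : posAt v ov.toNat ≤ posAt v w.toNat :=
              posAt_mono v (by omega) _ _ (by omega)
            omega
          omega

lemma alt_sorted (v xmin xmax ms : Int) :
    (StepsInTarget_X_alt v (xmin, xmax) ms).Pairwise (· < ·) := by
  simp only [StepsInTarget_X_alt, firstGeB]
  split_ifs <;>
    first
      | exact List.Pairwise.nil
      | exact PySem.List.pairwise_lt_pyRange_one _ _

-- ===== VERDICT (by name: the statement is the Claim_ definition above) =====
theorem StepsInTarget_X_spec : Claim_equal_StepsInTarget_X := by
  intro v tx ms _
  unfold Spec_StepsInTarget_X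
  obtain ⟨xmin, xmax⟩ := tx
  by_cases h0 : ms ≤ 0 ∨ xmax ≤ 0
  · have ha : StepsInTarget_X v (xmin, xmax) ms = [] := by
      rw [List.eq_nil_iff_forall_not_mem]
      intro u hu
      rw [A_mem] at hu
      obtain ⟨h1, h2, h3, _, _⟩ := hu
      have := h3 0 (by omega)
      simp [posAt] at this
      omega
    have hb : StepsInTarget_X_alt v (xmin, xmax) ms = [] := by
      simp only [StepsInTarget_X_alt]
      rw [if_pos h0]
    rw [ha, hb]
  · push_neg at h0
    by_cases hv : v ≤ 0
    · refine eq_of_pairwise_lt_of_mem (A_sorted v xmin xmax ms) (alt_sorted v xmin xmax ms) ?_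
      intro u
      rw [A_mem]
      have hconst := posAt_const_of_nonpos v hv
      simp only [StepsInTarget_X_alt]
      rw [if_neg (show ¬(ms ≤ 0 ∨ xmax ≤ 0) by omega), if_pos hv]
      by_cases hxm : v ≥ xmin
      · rw [if_pos hxm]
        rw [PySem.List.mem_pyRange_one]
        constructor
        · rintro ⟨h1, h2, _, _, _⟩; omega
        · rintro ⟨h1, h2⟩
          refine ⟨by omega, by omega, ?_, ?_, ?_⟩
          · intro s hs
            rcases Nat.eq_zero_or_pos s with h | h
            · subst h; simp [posAt]; omega
            · rw [hconst s h]; omega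
          · rw [hconst u.toNat (by omega)]; omega
          · rw [hconst u.toNat (by omega)]; omega
      · rw [if_neg hxm]
        simp only [List.not_mem_nil, iff_false]
        rintro ⟨h1, _, _, h4, _⟩
        rw [hconst u.toNat (by omega)] at h4
        omega
    · refine eq_of_pairwise_lt_of_mem (A_sorted v xmin xmax ms) (alt_sorted v xmin xmax ms) ?_
      intro u
      rw [A_mem, alt_mem v xmin xmax ms u (by omega) (by omega) (by omega)]
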